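-- pv_equiv track=rewrite | github.com/kyellsen/silvasonic | tests/smoke/test_health.py | _extract_pg_errors
-- ===== SOURCE A (Python) =====
-- def _extract_pg_errors(logs: str) -> list[str]:
--     """Extract PostgreSQL ERROR and FATAL log lines with their DETAIL/HINT context.
--
--     PostgreSQL logs multi-line error blocks like::
--
--         ERROR:  insert or update on table "recordings" violates foreign key ...
--         DETAIL:  Key (sensor_id)=(ghost) is not present in table "devices".
--         STATEMENT:  INSERT INTO recordings ...
--
--     This function collects the ERROR/FATAL line plus any immediately following
--     DETAIL, HINT, CONTEXT, or STATEMENT lines as a single block.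
--
--     Returns:
--         A list of error blocks, each as a joined multi-line string.
--     """
--     lines = logs.splitlines()
--     errors: list[str] = []
--     i = 0
--     # Context prefixes that PostgreSQL appends after an ERROR line
--     continuation_markers = ("DETAIL:", "HINT:", "CONTEXT:", "STATEMENT:")
--
--     while i < len(lines):
--         line = lines[i]
--         # Match PostgreSQL log format: "... ERROR:" or "... FATAL:"
--         if " ERROR:" in line or " FATAL:" in line:
--             block = [line.strip()]
--             # Collect continuation lines (DETAIL, HINT, STATEMENT)
--             j = i + 1
--             while j < len(lines):
--                 next_line = lines[j].strip()
--                 # Check if line contains any continuation marker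
--                 if any(marker in next_line for marker in continuation_markers):
--                     block.append(next_line)
--                     j += 1
--                 else:
--                     break
--             errors.append("\n".join(block))
--             i = j
--         else:
--             i += 1
--
--     return errors
-- ===== SOURCE B (Python) =====
-- def _extract_pg_errors(logs: str) -> list[str]:
--     """Single flat pass keeping an optional current block instead of an index walk."""
--     markers = ("DETAIL:", "HINT:", "CONTEXT:", "STATEMENT:")
--     errors: list[str] = []
--     current = None
--     for line in logs.splitlines():
--         s = line.strip()
--         if current is not None and any(m in s for m in markers):
--             current.append(s)
--             continue
--         if current is not None:
--             errors.append("\n".join(current))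
--             current = None
--         if " ERROR:" in line or " FATAL:" in line:
--             current = [s]
--     if current is not None:
--         errors.append("\n".join(current))
--     return errors
-- ===== Notes on version B (the rewrite author's own statement) =====
-- stated objective: simpler
-- what changed: Replaces A's index-walk with a nested inner while over j by one flat loop over the lines maintaining an optional current block that is flushed when a non-continuation line appears and after the loop.
import Mathlib
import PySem

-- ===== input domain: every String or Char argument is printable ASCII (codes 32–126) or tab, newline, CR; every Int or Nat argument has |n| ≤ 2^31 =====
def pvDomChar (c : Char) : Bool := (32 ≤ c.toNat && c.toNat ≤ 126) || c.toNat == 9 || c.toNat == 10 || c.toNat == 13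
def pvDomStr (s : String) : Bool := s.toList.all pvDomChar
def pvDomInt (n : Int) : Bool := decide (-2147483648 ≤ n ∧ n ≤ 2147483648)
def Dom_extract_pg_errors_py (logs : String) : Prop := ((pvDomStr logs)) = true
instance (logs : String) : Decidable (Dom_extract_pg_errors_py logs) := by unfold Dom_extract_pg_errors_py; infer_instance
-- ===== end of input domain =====

-- B replaces A's index-walk with nested inner while by one flat pass keeping an optional current block (objective: simpler).

-- ===== PORT A =====
def pvMarkers : List String := ["DETAIL:", "HINT:", "CONTEXT:", "STATEMENT:"]

def pvIsCont (s : String) : Bool := pvMarkers.any (fun m => PySem.Str.isIn m s)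

def pvIsErr (line : String) : Bool := PySem.Str.isIn " ERROR:" line || PySem.Str.isIn " FATAL:" line

-- inner while: collects stripped continuation lines, returns (block, remaining lines from j)
def pvCollect (rest : List String) (block : List String) : List String × List String :=
  match rest with
  | [] => (block, [])
  | l :: ls =>
    if pvIsCont (PySem.Str.strip l) then pvCollect ls (block ++ [PySem.Str.strip l])
    else (block, l :: ls)

-- termination helper for pvLoopA (cited in its decreasing_by)
theorem pvCollect_len (rest block : List String) : (pvCollect rest block).2.length ≤ rest.length := by
  induction rest generalizing block with
  | nil => simp [pvCollect]
  | cons l ls ih =>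
    simp only [pvCollect]
    split
    · exact le_trans (ih _) (Nat.le_succ _)
    · simp

-- outer while over the line list (i becomes the remaining suffix)
def pvLoopA : List String → List String
  | [] => []
  | l :: ls =>
    if pvIsErr l then
      PySem.Str.join "\n" (pvCollect ls [PySem.Str.strip l]).1
        :: pvLoopA (pvCollect ls [PySem.Str.strip l]).2
    else pvLoopA ls
termination_by ls => ls.length
decreasing_by
  · exact Nat.lt_succ_of_le (pvCollect_len ls [PySem.Str.strip l])
  · simp

def extract_pg_errors_py (logs : String) : List String :=
  pvLoopA (PySem.Str.splitlines logs)

-- ===== PORT B =====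
-- state: (errors so far, optional current block)
def pvStep (st : List String × Option (List String)) (line : String) : List String × Option (List String) :=
  let s := PySem.Str.strip line
  match st.2 with
  | some cur =>
    if pvIsCont s then (st.1, some (cur ++ [s]))
    else (st.1 ++ [PySem.Str.join "\n" cur], if pvIsErr line then some [s] else none)
  | none => (st.1, if pvIsErr line then some [s] else none)

def pvFlush (st : List String × Option (List String)) : List String :=
  match st.2 with
  | some cur => st.1 ++ [PySem.Str.join "\n" cur]
  | none => st.1

def extract_pg_errors_py_alt (logs : String) : List String :=
  pvFlush ((PySem.Str.splitlines logs).foldl pvStep ([], none))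

-- ===== PRECONDITION & SPEC =====
def Spec_extract_pg_errors_py (logs : String) (out : List String) : Prop := out = extract_pg_errors_py_alt logs
instance (logs : String) (out : List String) : Decidable (Spec_extract_pg_errors_py logs out) := by unfold Spec_extract_pg_errors_py; infer_instance

-- ===== CLAIM (what is proved, stated in full; the proofs are below) =====
def Claim_equal_extract_pg_errors_py : Prop := ∀ (logs : String), Dom_extract_pg_errors_py logs → Spec_extract_pg_errors_py logs (extract_pg_errors_py logs)

-- ===== LEMMAS AND PROOFS =====

-- the flat fold, started with or without an open block, computes the index-walk's result
theorem pvComb (ls : List String) :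
    (∀ acc, pvFlush (ls.foldl pvStep (acc, none)) = acc ++ pvLoopA ls) ∧
    (∀ acc blk, pvFlush (ls.foldl pvStep (acc, some blk)) =
      acc ++ PySem.Str.join "\n" (pvCollect ls blk).1 :: pvLoopA (pvCollect ls blk).2) := by
  induction ls with
  | nil => simp [pvFlush, pvLoopA, pvCollect]
  | cons l ls ih =>
    obtain ⟨ih1, ih2⟩ := ih
    constructor
    · intro acc
      by_cases he : pvIsErr l
      · simp only [List.foldl_cons, pvStep, he, if_pos]
        rw [ih2]
        rw [pvLoopA]
        simp [he]
      · simp only [List.foldl_cons, pvStep, he, Bool.false_eq_true, if_false]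
        rw [ih1]
        rw [pvLoopA]
        simp [he]
    · intro acc blk
      by_cases hc : pvIsCont (PySem.Str.strip l)
      · simp only [List.foldl_cons, pvStep, hc, if_pos]
        rw [ih2]
        simp [pvCollect, hc]
      · by_cases he : pvIsErr l
        · simp only [List.foldl_cons, pvStep, hc, Bool.false_eq_true, if_false, he, if_pos]
          rw [ih2]
          rw [show pvCollect (l :: ls) blk = (blk, l :: ls) by simp [pvCollect, hc]]
          rw [pvLoopA]
          simp [he]
        · simp only [List.foldl_cons, pvStep, hc, he, Bool.false_eq_true, if_false]
          rw [ih1]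
          rw [show pvCollect (l :: ls) blk = (blk, l :: ls) by simp [pvCollect, hc]]
          rw [pvLoopA]
          simp [he]

-- ===== VERDICT (by name: the statement is the Claim_ definition above) =====
theorem extract_pg_errors_py_spec : Claim_equal_extract_pg_errors_py := by
  intro logs _
  unfold Spec_extract_pg_errors_py extract_pg_errors_py extract_pg_errors_py_alt
  exact ((pvComb (PySem.Str.splitlines logs)).1 []).symm
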